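-- pv_equiv track=rewrite | github.com/gptanon/wttest | examples/jtfs-min/jtfs_min/scattering1d/scat_utils.py | compute_border_indices
-- ===== SOURCE A (Python) =====
-- import math
--
-- def compute_border_indices(log2_T, J, i0, i1):
--     """
--     Computes border indices at all scales which correspond to the original
--     signal boundaries after padding.
--
--     At the finest resolution,
--     original_signal = padded_signal[..., i0:i1].
--     This function finds the integers i0, i1 for all temporal subsamplings
--     by 2**J, being conservative on the indices.
--
--     Maximal subsampling is by `2**log2_T` if `average=True`, else by
--     `2**max(log2_T, J)`. We compute indices up to latter to be sure.
--
--     Parameters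
--     ----------
--     log2_T : int
--         Maximal subsampling by low-pass filtering is `2**log2_T`.
--     J : int / tuple[int]
--         Maximal subsampling by band-pass filtering is `2**J`.
--     i0 : int
--         start index of the original signal at the finest resolution
--     i1 : int
--         end index (excluded) of the original signal at the finest resolution
--
--     Returns
--     -------
--     ind_start, ind_end: dictionaries with keys in [0, ..., log2_T] such that the
--         original signal is in padded_signal[ind_start[j]:ind_end[j]]
--         after subsampling by 2**j
--
--     References
--     ----------
--     This is a modification of
--     https://github.com/kymatio/kymatio/blob/master/kymatio/scattering1d/utils.py
--     Kymatio, (C) 2018-present. The Kymatio developers.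
--     """
--     if isinstance(J, tuple):
--         J = max(J)
--     ind_start = {0: i0}
--     ind_end = {0: i1}
--     for j in range(1, max(log2_T, J) + 1):
--         ind_start[j] = math.ceil(ind_start[j - 1] / 2)
--         ind_end[j] = math.ceil(ind_end[j - 1] / 2)
--     return ind_start, ind_end
-- ===== SOURCE B (Python) =====
-- def compute_border_indices(log2_T, J, i0, i1):
--     if isinstance(J, tuple):
--         J = max(J)
--     js = range(max(log2_T, J, 0) + 1)
--     ind_start = {j: -(-i0 >> j) for j in js}
--     ind_end = {j: -(-i1 >> j) for j in js}
--     return ind_start, ind_end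
-- ===== Notes on version B (the rewrite author's own statement) =====
-- stated objective: simpler
-- what changed: Replaces A's sequential halving recurrence (each dict entry computed from its predecessor via float division and math.ceil) with a direct closed form per key, -(-i >> j) = ceil(i / 2**j), built by two dict comprehensions with no recurrence and no floating point; the tuple-J normalisation is kept.
import Mathlib
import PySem

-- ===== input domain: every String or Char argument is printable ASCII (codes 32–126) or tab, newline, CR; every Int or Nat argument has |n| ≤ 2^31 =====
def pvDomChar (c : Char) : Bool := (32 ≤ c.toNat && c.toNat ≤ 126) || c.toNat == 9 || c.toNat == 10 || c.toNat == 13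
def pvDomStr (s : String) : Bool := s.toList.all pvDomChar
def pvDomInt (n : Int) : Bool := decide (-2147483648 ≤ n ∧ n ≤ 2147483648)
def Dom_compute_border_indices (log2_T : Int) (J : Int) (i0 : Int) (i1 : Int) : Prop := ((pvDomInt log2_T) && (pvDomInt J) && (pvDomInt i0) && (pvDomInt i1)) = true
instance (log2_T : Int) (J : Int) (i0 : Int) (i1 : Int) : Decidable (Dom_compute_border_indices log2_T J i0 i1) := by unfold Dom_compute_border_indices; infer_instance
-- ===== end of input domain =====

-- B replaces A's per-step halving recurrence (ind_start[j] = ceil(ind_start[j-1]/2)) by a direct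
-- closed form per key, -(-i >> j) = ceil(i / 2**j); objective: simpler (no recurrence, no float).
-- J : Int here, so Python A's tuple branch is never taken; math.ceil(y/2) on an int y with
-- |y| ≤ 2^31 is exactly the integer ceiling -((-y)//2) (floats are exact there).

-- ===== PORT A =====
-- math.ceil(y / 2): exact integer ceiling division by 2 on the stated domain
def pvCeilHalf (y : Int) : Int := -(PySem.Int.floordiv (-y) 2)

def compute_border_indices (log2_T : Int) (J : Int) (i0 : Int) (i1 : Int) : (List (Int × Int)) × (List (Int × Int)) :=
  -- ind_start = {0: i0}; ind_end = {0: i1}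
  let ind_start : PySem.Dict Int Int := PySem.Dict.empty.insert 0 i0
  let ind_end : PySem.Dict Int Int := PySem.Dict.empty.insert 0 i1
  -- for j in range(1, max(log2_T, J) + 1): ind_start[j] = ceil(ind_start[j-1]/2); same for ind_end
  -- (key j-1 is always present, so the getD default 0 is never used)
  let p := (PySem.List.pyRange 1 (max log2_T J + 1) 1).foldl
    (fun (se : PySem.Dict Int Int × PySem.Dict Int Int) j =>
      (se.1.insert j (pvCeilHalf (se.1.getD (j - 1) 0)),
       se.2.insert j (pvCeilHalf (se.2.getD (j - 1) 0))))
    (ind_start, ind_end)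
  (p.1.items, p.2.items)

-- ===== PORT B =====
-- -(-x >> j): Python's arithmetic right shift, ceil(x / 2**j)
def pvCeilShift (x : Int) (j : Int) : Int := -((-x) >>> j.toNat)

def compute_border_indices_alt (log2_T : Int) (J : Int) (i0 : Int) (i1 : Int) : (List (Int × Int)) × (List (Int × Int)) :=
  -- js = range(max(log2_T, J, 0) + 1)
  let js := PySem.List.pyRange 0 (max (max log2_T J) 0 + 1) 1
  (js.map (fun j => (j, pvCeilShift i0 j)), js.map (fun j => (j, pvCeilShift i1 j)))

-- ===== PRECONDITION & SPEC =====
def Spec_compute_border_indices (log2_T : Int) (J : Int) (i0 : Int) (i1 : Int) (out : (List (Int × Int)) × (List (Int × Int))) : Prop := out = compute_border_indices_alt log2_T J i0 i1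
instance (log2_T : Int) (J : Int) (i0 : Int) (i1 : Int) (out : (List (Int × Int)) × (List (Int × Int))) : Decidable (Spec_compute_border_indices log2_T J i0 i1 out) := by unfold Spec_compute_border_indices; infer_instance

-- ===== CLAIM (what is proved, stated in full; the proofs are below) =====
def Claim_equal_compute_border_indices : Prop := ∀ (log2_T : Int) (J : Int) (i0 : Int) (i1 : Int), Dom_compute_border_indices log2_T J i0 i1 → Spec_compute_border_indices log2_T J i0 i1 (compute_border_indices log2_T J i0 i1)

-- ===== LEMMAS AND PROOFS =====

-- the closed-form table entry: ceil(x / 2^k) as an arithmetic shift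
def pvG (x : Int) (k : Nat) : Int := -((-x) >>> k)

-- halving the k-th ceiling gives the (k+1)-th ceiling
theorem pvCeilHalf_shift (x : Int) (k : Nat) :
    pvCeilHalf (pvG x k) = pvG x (k + 1) := by
  unfold pvCeilHalf pvG
  rw [neg_neg, PySem.Int.floordiv_eq_ediv_of_pos (by omega)]
  simp [Int.shiftRight_eq_div_pow, pow_succ, Int.ediv_ediv_of_nonneg, mul_comm]

-- an empty range when the bound is at most the start
theorem pvRange_nil (b : Int) (h : b ≤ 1) : PySem.List.pyRange 1 b 1 = [] := by
  simp [PySem.List.pyRange]; omega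

-- A's loop bound can be clamped to 0: below it the range is empty either way
theorem pvRange_clamp (m : Int) :
    PySem.List.pyRange 1 (m + 1) 1 = PySem.List.pyRange 1 (max m 0 + 1) 1 := by
  rcases le_or_gt 0 m with h | h
  · rw [max_eq_left h]
  · rw [max_eq_right h.le, pvRange_nil _ (by omega), pvRange_nil _ (by omega)]

-- A's dict loop, one component: the folded dict is exactly the closed-form table
theorem pvLoop (x : Int) (n : Nat) :
    (PySem.List.pyRange 1 ((n : Int) + 1) 1).foldl
      (fun d j => d.insert j (pvCeilHalf (d.getD (j - 1) 0)))
      (PySem.Dict.empty.insert 0 x)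
    = PySem.Dict.mk ((List.range (n + 1)).map (fun k : Nat => ((k : Int), pvG x k))) := by
  induction n with
  | zero =>
    rw [show ((0 : Nat) : Int) + 1 = 1 by norm_num, pvRange_nil 1 le_rfl]
    apply PySem.Dict.ext
    rw [List.foldl_nil,
      PySem.Dict.items_insert_of_not_contains _ _ (PySem.Dict.contains_empty _)]
    show [((0 : Int), x)] = [((0 : Int), pvG x 0)]
    norm_num [pvG, Int.shiftRight_eq_div_pow]
  | succ n ih =>
    have hb : (1 : Int) ≤ (n : Int) + 1 := by omega
    rw [show ((n + 1 : Nat) : Int) + 1 = ((n : Int) + 1) + 1 by push_cast; ring,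
      PySem.List.pyRange_one_succ_right hb, List.foldl_append, ih]
    set L := (List.range (n + 1)).map (fun k : Nat => ((k : Int), pvG x k)) with hL
    have hitems : (PySem.Dict.mk L).items = L := rfl
    have hnd : (PySem.Dict.mk L).keys.Nodup := by
      have hkeys : (PySem.Dict.mk L).keys = (List.range (n + 1)).map (fun k : Nat => (k : Int)) := by
        show L.map Prod.fst = _
        rw [hL, List.map_map]; rfl
      rw [hkeys]
      exact List.nodup_range.map (fun a b h => by exact_mod_cast h)
    have hmem : (((n : Int), pvG x n)) ∈ (PySem.Dict.mk L).items := by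
      rw [hitems, hL]
      exact List.mem_map.mpr ⟨n, List.mem_range.mpr (by omega), rfl⟩
    have hget : (PySem.Dict.mk L).getD ((n : Int) + 1 - 1) 0 = pvG x n := by
      rw [show (n : Int) + 1 - 1 = (n : Int) by ring]
      exact PySem.Dict.getD_of_mem_items _ hmem hnd 0
    have hcon : (PySem.Dict.mk L).contains ((n : Int) + 1) = false := by
      rw [PySem.Dict.contains_mk, hL, List.any_map, List.any_eq_false]
      intro k hkr
      simp only [Function.comp, beq_iff_eq]
      intro hEq
      have hcast : (k : Int) = (n : Int) + 1 := hEq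
      have hk : k = n + 1 := by exact_mod_cast hcast
      exact absurd (List.mem_range.mp hkr) (by omega)
    rw [List.foldl_cons, List.foldl_nil, hget, pvCeilHalf_shift]
    apply PySem.Dict.ext
    rw [PySem.Dict.items_insert_of_not_contains _ _ hcon, hitems, hL]
    show _ = (List.range (n + 1 + 1)).map (fun k : Nat => ((k : Int), pvG x k))
    rw [List.range_succ (n := n + 1), List.map_append]
    congr 1

-- A's paired fold splits into two independent folds
theorem pvPair (l : List Int) (a b : PySem.Dict Int Int) :
    l.foldl
      (fun (se : PySem.Dict Int Int × PySem.Dict Int Int) j =>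
        (se.1.insert j (pvCeilHalf (se.1.getD (j - 1) 0)),
         se.2.insert j (pvCeilHalf (se.2.getD (j - 1) 0)))) (a, b)
    = (l.foldl (fun d j => d.insert j (pvCeilHalf (d.getD (j - 1) 0))) a,
       l.foldl (fun d j => d.insert j (pvCeilHalf (d.getD (j - 1) 0))) b) :=
  PySem.List.foldl_prod_mk
    (fun d j => d.insert j (pvCeilHalf (d.getD (j - 1) 0)))
    (fun d j => d.insert j (pvCeilHalf (d.getD (j - 1) 0))) l a b

-- B's map over the range, rewritten through List.range
theorem pvAltMap (x : Int) (n : Nat) :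
    (PySem.List.pyRange 0 ((n : Int) + 1) 1).map (fun j => (j, pvCeilShift x j))
    = (List.range (n + 1)).map (fun k : Nat => ((k : Int), pvG x k)) := by
  rw [show ((n : Int) + 1) = ((n + 1 : Nat) : Int) by push_cast; ring,
    PySem.List.pyRange_zero_natCast, List.map_map]
  apply List.map_congr_left
  intro k _
  simp [pvCeilShift, pvG, Function.comp]

-- ===== VERDICT (by name: the statement is the Claim_ definition above) =====
theorem compute_border_indices_spec : Claim_equal_compute_border_indices := by
  intro log2_T J i0 i1 _
  show compute_border_indices log2_T J i0 i1 = compute_border_indices_alt log2_T J i0 i1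
  simp only [compute_border_indices, compute_border_indices_alt]
  obtain ⟨n, hn⟩ : ∃ n : Nat, max (max log2_T J) 0 = (n : Int) :=
    ⟨(max (max log2_T J) 0).toNat,
      (Int.toNat_of_nonneg (le_max_right _ _)).symm⟩
  rw [pvPair, pvRange_clamp, hn, pvLoop, pvLoop, pvAltMap, pvAltMap]
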